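-- pv_equiv track=rewrite | github.com/k-goe/ethertracer | src/ethertracer/helpers.py | get_compound_subsets
-- ===== SOURCE A (Python) =====
-- def get_compound_subsets(list, indicator=True):
--     """
--     Divides a list into related parts
--
--     :param list: List to be subdivided
--     :param indicator: Specifies which value is to be combined into a sequence
--     :return: Returns a nested list in which each entry marks a connected segment with all addresses
--     """
--     index_subset_element = []
--
--     for i in range(len(list)):
--         if (list[i] == indicator):
--             index_subset_element.append(i)
--
--     number_of_subsets = 0
--     subsets = []
--
--     for i in range(len(index_subset_element)):
--
--         subsets.append(number_of_subsets)
--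
--         if (i < len(index_subset_element) - 1):
--             if (index_subset_element[i + 1] - index_subset_element[i] > 1):
--                 number_of_subsets = number_of_subsets + 1
--
--     subsets_indices = []  # result
--
--     for i in range(number_of_subsets + 1):
--
--         temp_splitted_element_indices = []
--
--         for j in range(len(subsets)):
--             if (subsets[j] == i):
--                 temp_splitted_element_indices.append(index_subset_element[j])
--
--         subsets_indices.append(temp_splitted_element_indices)
--
--     return subsets_indices
-- ===== SOURCE B (Python) =====
-- def get_compound_subsets(list, indicator=True):
--     """Single linear pass: extend the current run on consecutive indices,
--     start a new sublist on a gap."""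
--     result = []
--     prev = None
--     for i, v in enumerate(list):
--         if v == indicator:
--             if prev is not None and i - prev == 1:
--                 result[-1].append(i)
--             else:
--                 result.append([i])
--             prev = i
--     return result
-- ===== Notes on version B (the rewrite author's own statement) =====
-- stated objective: faster
-- what changed: Replaced the three-pass label-then-rescan scheme (collect indices, number each group, then rescan the whole label list once per group) by a single linear pass that appends each matching index to the current run or starts a new sublist on an index gap.
-- intended difference: On inputs containing no element equal to indicator, A returns [[]] (an artefact of its 'number_of_subsets + 1' loop), while B returns [], the intended 'no segments' answer. — e.g. on get_compound_subsets([false, false], true): A returns [[]], B returns []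
import Mathlib
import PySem

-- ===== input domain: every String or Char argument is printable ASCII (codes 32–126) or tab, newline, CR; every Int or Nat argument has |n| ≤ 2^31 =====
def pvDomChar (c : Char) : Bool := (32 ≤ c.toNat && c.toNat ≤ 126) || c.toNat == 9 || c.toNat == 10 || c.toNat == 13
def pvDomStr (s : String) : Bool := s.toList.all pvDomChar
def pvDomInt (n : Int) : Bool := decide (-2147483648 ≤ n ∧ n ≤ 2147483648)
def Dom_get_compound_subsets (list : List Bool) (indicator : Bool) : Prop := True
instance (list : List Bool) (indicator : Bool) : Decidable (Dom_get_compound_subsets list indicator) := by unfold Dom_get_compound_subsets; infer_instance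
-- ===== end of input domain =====

-- B replaces A's three-pass label-then-rescan grouping by one linear pass that extends the
-- current run or starts a new sublist on an index gap (faster); on lists without any
-- element equal to indicator, B returns [] where A returns [[]] (stated as D_ below).

-- ===== PORT A =====
-- Literal port of A, one helper per Python loop. Loop indices are always in range,
-- so the getD defaults are never read.
-- for i in range(len(list)): if list[i] == indicator: index_subset_element.append(i)
def pvA_index (list : List Bool) (indicator : Bool) : List Int :=
  (List.range list.length).foldl
    (fun acc i => if list.getD i (!indicator) = indicator then acc ++ [(i : Int)] else acc) []

-- for i in range(len(idx)): subsets.append(n); if i < len-1 and idx[i+1]-idx[i] > 1: n += 1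
def pvA_label (idx : List Int) : Int × List Int :=
  (List.range idx.length).foldl
    (fun st i =>
      let subsets := st.2 ++ [st.1]
      let n := if i < idx.length - 1 ∧ idx.getD (i+1) 0 - idx.getD i 0 > 1
               then st.1 + 1 else st.1
      (n, subsets)) (0, [])

-- for i in range(number_of_subsets + 1): rescan subsets, collect idx[j] with subsets[j] == i
def pvA_collect (idx : List Int) (st : Int × List Int) : List (List Int) :=
  (PySem.List.pyRange 0 (st.1 + 1) 1).foldl
    (fun res i =>
      res ++ [(List.range st.2.length).foldl
        (fun temp j => if st.2.getD j (-1) = i then temp ++ [idx.getD j 0] else temp) []]) []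

def get_compound_subsets (list : List Bool) (indicator : Bool) : List (List Int) :=
  pvA_collect (pvA_index list indicator) (pvA_label (pvA_index list indicator))

-- ===== PORT B =====
-- result[-1].append(i)
def pvAppendLast : List (List Int) → Int → List (List Int)
  | [], i => [[i]]
  | [xs], i => [xs ++ [i]]
  | xs :: rest, i => xs :: pvAppendLast rest i

def get_compound_subsets_alt (list : List Bool) (indicator : Bool) : List (List Int) :=
  ((PySem.List.enumerate list).foldl
    (fun (st : List (List Int) × Option Int) p =>
      if p.2 = indicator then
        match st.2 with
        | some prev =>
            if p.1 - prev = 1 then (pvAppendLast st.1 p.1, some p.1)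
            else (st.1 ++ [[p.1]], some p.1)
        | none => (st.1 ++ [[p.1]], some p.1)
      else st) ([], none)).1

-- ===== PRECONDITION & SPEC =====
-- On inputs with no element equal to indicator, A returns [[]] (an artefact of its
-- 'range(number_of_subsets + 1)' loop) while B returns [], the intended 'no segments' answer.
def D_get_compound_subsets (list : List Bool) (indicator : Bool) : Prop := indicator ∉ list
instance (list : List Bool) (indicator : Bool) : Decidable (D_get_compound_subsets list indicator) := by
  unfold D_get_compound_subsets; infer_instance

def Spec_get_compound_subsets (list : List Bool) (indicator : Bool) (out : List (List Int)) : Prop :=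
  ¬ D_get_compound_subsets list indicator → out = get_compound_subsets_alt list indicator
instance (list : List Bool) (indicator : Bool) (out : List (List Int)) : Decidable (Spec_get_compound_subsets list indicator out) := by
  unfold Spec_get_compound_subsets; infer_instance

def pvDiffWitness_get_compound_subsets : List Bool × Bool := ([false, false], true)
def pvDiffWitnessOut_get_compound_subsets : (List (List Int)) × (List (List Int)) := ([[]], [])

-- ===== CLAIM (what is proved, stated in full; the proofs are below) =====
def Claim_unchanged_get_compound_subsets : Prop := ∀ (list : List Bool) (indicator : Bool), Dom_get_compound_subsets list indicator → Spec_get_compound_subsets list indicator (get_compound_subsets list indicator)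
def Claim_changed_get_compound_subsets : Prop := Dom_get_compound_subsets (pvDiffWitness_get_compound_subsets.1) (pvDiffWitness_get_compound_subsets.2) ∧ D_get_compound_subsets (pvDiffWitness_get_compound_subsets.1) (pvDiffWitness_get_compound_subsets.2) ∧ get_compound_subsets (pvDiffWitness_get_compound_subsets.1) (pvDiffWitness_get_compound_subsets.2) = pvDiffWitnessOut_get_compound_subsets.1 ∧ get_compound_subsets_alt (pvDiffWitness_get_compound_subsets.1) (pvDiffWitness_get_compound_subsets.2) = pvDiffWitnessOut_get_compound_subsets.2 ∧ pvDiffWitnessOut_get_compound_subsets.1 ≠ pvDiffWitnessOut_get_compound_subsets.2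
def Claim_exact_get_compound_subsets : Prop := ∀ (list : List Bool) (indicator : Bool), Dom_get_compound_subsets list indicator → D_get_compound_subsets list indicator → get_compound_subsets list indicator ≠ get_compound_subsets_alt list indicator

-- ===== LEMMAS AND PROOFS =====

-- the list of (Int) indices of elements equal to ind, starting at offset s
def pvIdx : List Bool → Bool → Int → List Int
  | [], _, _ => []
  | x :: xs, ind, s => if x = ind then s :: pvIdx xs ind (s+1) else pvIdx xs ind (s+1)

-- gap test of A's second loop at position t
def pvGap (idx : List Int) (t : Nat) : Bool :=
  decide (t < idx.length - 1) && decide (idx.getD (t+1) 0 - idx.getD t 0 > 1)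

-- label of position i (A's number_of_subsets just before iteration i)
def pvLab (idx : List Int) (i : Nat) : Nat := (List.range i).countP (pvGap idx)

-- A's result as a function of the index list
def pvGA (idx : List Int) : List (List Int) :=
  (List.range (pvLab idx idx.length + 1)).map (fun c =>
    ((List.range idx.length).filter (fun j => pvLab idx j = c)).map (fun j => idx.getD j 0))

-- B's fold step on a matching index
def pvStep (st : List (List Int) × Option Int) (i : Int) : List (List Int) × Option Int :=
  match st.2 with
  | some prev => if i - prev = 1 then (pvAppendLast st.1 i, some i) else (st.1 ++ [[i]], some i)
  | none => (st.1 ++ [[i]], some i)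

theorem pvIdx_lower (l : List Bool) (ind : Bool) (s : Int) : ∀ x ∈ pvIdx l ind s, s ≤ x := by
  induction l generalizing s with
  | nil => simp [pvIdx]
  | cons y ys ih =>
    intro x hx
    simp only [pvIdx] at hx
    split at hx
    · rcases List.mem_cons.mp hx with h | h
      · omega
      · have := ih (s+1) x h; omega
    · have := ih (s+1) x hx; omega

theorem pvIdx_pairwise (l : List Bool) (ind : Bool) (s : Int) :
    (pvIdx l ind s).Pairwise (· < ·) := by
  induction l generalizing s with
  | nil => simp [pvIdx]
  | cons y ys ih =>
    simp only [pvIdx]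
    split
    · exact List.Pairwise.cons (fun x hx => by have := pvIdx_lower ys ind (s+1) x hx; omega) (ih (s+1))
    · exact ih (s+1)

theorem pvIdx_nil_of_not_mem (l : List Bool) (ind : Bool) : ∀ (s : Int), ind ∉ l → pvIdx l ind s = [] := by
  induction l with
  | nil => intro s _; rfl
  | cons y ys ih =>
    intro s h
    simp only [pvIdx]
    have hy : y ≠ ind := fun he => h (he ▸ List.mem_cons_self)
    rw [if_neg hy]
    exact ih (s+1) (fun hm => h (List.mem_cons_of_mem _ hm))

theorem pvIdx_ne_nil_of_mem (l : List Bool) (ind : Bool) : ∀ (s : Int), ind ∈ l → pvIdx l ind s ≠ [] := by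
  induction l with
  | nil => intro s h; simp at h
  | cons y ys ih =>
    intro s h
    simp only [pvIdx]
    rcases List.mem_cons.mp h with he | hm
    · rw [if_pos he.symm]; simp
    · split
      · simp
      · exact ih (s+1) hm

-- loop 1 of A computes pvIdx
theorem pvLoop1_eq (l : List Bool) (ind : Bool) : ∀ (s : Int),
    ((List.range l.length).filter (fun i => decide (l.getD i (!ind) = ind))).map (fun i : Nat => s + (i : Int))
      = pvIdx l ind s := by
  induction l with
  | nil => intro s; simp [pvIdx]
  | cons y ys ih =>
    intro s
    rw [List.length_cons, List.range_succ_eq_map, List.filter_cons]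
    rw [List.filter_map]
    have h1 : ((fun i => decide (List.getD (y :: ys) i (!ind) = ind)) ∘ Nat.succ)
        = (fun i => decide (ys.getD i (!ind) = ind)) := by
      funext i; simp [Function.comp]
    rw [h1]
    have h2 : (List.map Nat.succ ((List.range ys.length).filter (fun i => decide (ys.getD i (!ind) = ind)))).map (fun i : Nat => s + (i : Int))
        = ((List.range ys.length).filter (fun i => decide (ys.getD i (!ind) = ind))).map (fun i : Nat => (s+1) + (i : Int)) := by
      rw [List.map_map]
      apply List.map_congr_left
      intro i _
      simp [Function.comp]; omega
    simp only [List.getD_cons_zero, pvIdx]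
    by_cases hy : y = ind
    · simp only [hy, decide_true, if_true, if_pos rfl, List.map_cons]
      rw [h2, ih (s+1)]
      simp
    · have hd : (decide (y = ind)) = false := by simp [hy]
      simp only [hd, Bool.false_eq_true, if_false, if_neg hy]
      rw [h2, ih (s+1)]

theorem pvA_index_eq (l : List Bool) (ind : Bool) : pvA_index l ind = pvIdx l ind 0 := by
  unfold pvA_index
  rw [PySem.List.foldl_append_ite]
  have h0 : ((List.range l.length).filter (fun i => decide (l.getD i (!ind) = ind))).map (fun i : Nat => (i : Int))
      = pvIdx l ind 0 := by
    rw [← pvLoop1_eq l ind 0]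
    apply List.map_congr_left
    intro i _
    omega
  simpa using h0

-- loop 2 of A computes the labels
theorem pvA_label_eq (idx : List Int) :
    pvA_label idx = ((pvLab idx idx.length : Int), (List.range idx.length).map (fun i => (pvLab idx i : Int))) := by
  unfold pvA_label
  suffices h : ∀ k, (List.range k).foldl
      (fun (st : Int × List Int) i =>
        let subsets := st.2 ++ [st.1]
        let n := if i < idx.length - 1 ∧ idx.getD (i+1) 0 - idx.getD i 0 > 1
                 then st.1 + 1 else st.1
        (n, subsets)) (0, [])
      = ((pvLab idx k : Int), (List.range k).map (fun i => (pvLab idx i : Int))) from h idx.length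
  intro k
  induction k with
  | zero => simp [pvLab]
  | succ k ih =>
    rw [List.range_succ, List.foldl_append, ih]
    simp only [List.foldl_cons, List.foldl_nil, List.map_append, List.map_cons, List.map_nil]
    have hlab : pvLab idx (k+1) = pvLab idx k + (if pvGap idx k then 1 else 0) := by
      rw [pvLab, List.range_succ, List.countP_append, List.countP_cons]
      simp [pvLab]
    simp only [Prod.mk.injEq]
    refine ⟨?_, trivial⟩
    by_cases h : k < idx.length - 1 ∧ idx.getD (k+1) 0 - idx.getD k 0 > 1
    · have hg : pvGap idx k = true := by
        unfold pvGap
        rw [Bool.and_eq_true, decide_eq_true_iff, decide_eq_true_iff]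
        exact ⟨h.1, h.2⟩
      rw [if_pos h, hlab, hg]
      simp only [if_true]
      push_cast
      ring
    · have hg : pvGap idx k = false := by
        by_contra hc
        have ht : pvGap idx k = true := by revert hc; cases pvGap idx k <;> simp
        unfold pvGap at ht
        rw [Bool.and_eq_true, decide_eq_true_iff, decide_eq_true_iff] at ht
        exact h ht
      rw [if_neg h, hlab, hg]
      simp only [Bool.false_eq_true, if_false]
      push_cast
      ring

-- loop 3 of A, fed the labels, computes pvGA
theorem pvA_collect_eq (idx : List Int) :
    pvA_collect idx ((pvLab idx idx.length : Int), (List.range idx.length).map (fun i => (pvLab idx i : Int)))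
      = pvGA idx := by
  unfold pvA_collect
  simp only [List.length_map, List.length_range]
  have hrange : PySem.List.pyRange 0 ((pvLab idx idx.length : Int) + 1) 1
      = (List.range (pvLab idx idx.length + 1)).map (fun c : Nat => (c : Int)) := by
    have h : ((pvLab idx idx.length : Int) + 1) = ((pvLab idx idx.length + 1 : Nat) : Int) := by
      push_cast; ring
    rw [h, PySem.List.pyRange_zero_nat]
  rw [hrange, List.foldl_map]
  have hinner : ∀ c : Nat,
      (List.range idx.length).foldl
        (fun temp j =>
          if ((List.range idx.length).map (fun i => (pvLab idx i : Int))).getD j (-1) = (c : Int)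
          then temp ++ [idx.getD j 0] else temp) []
      = ((List.range idx.length).filter (fun j => pvLab idx j = c)).map (fun j => idx.getD j 0) := by
    intro c
    rw [PySem.List.foldl_append_ite]
    simp only [List.nil_append]
    refine congrArg (List.map _) (List.filter_congr ?_)
    intro j hj
    have hjk : j < idx.length := List.mem_range.mp hj
    have hg : ((List.range idx.length).map (fun i => (pvLab idx i : Int))).getD j (-1) = (pvLab idx j : Int) := by
      rw [List.getD_eq_getElem?_getD]
      simp [hjk]
    rw [hg]
    simp
  simp only [hinner]
  rw [PySem.List.foldl_append_singleton_eq_map]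
  simp [pvGA]

-- A as a function of pvIdx
theorem pvA_eq_GA (l : List Bool) (ind : Bool) :
    get_compound_subsets l ind = pvGA (pvIdx l ind 0) := by
  unfold get_compound_subsets
  rw [pvA_index_eq, pvA_label_eq, pvA_collect_eq]

-- B as a fold of pvStep over pvIdx
theorem pvEnumFilter_eq (l : List Bool) (ind : Bool) : ∀ (s : Int),
    ((PySem.List.enumerate l s).filter (fun p => decide (p.2 = ind))).map (fun p => p.1)
      = pvIdx l ind s := by
  induction l with
  | nil => intro s; simp [PySem.List.enumerate_nil, pvIdx]
  | cons y ys ih =>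
    intro s
    rw [PySem.List.enumerate_cons, List.filter_cons]
    simp only [pvIdx]
    by_cases hy : y = ind
    · simp [hy, ih (s+1)]
    · simp [hy, ih (s+1)]

theorem pvB_eq_fold (l : List Bool) (ind : Bool) :
    get_compound_subsets_alt l ind = ((pvIdx l ind 0).foldl pvStep ([], none)).1 := by
  unfold get_compound_subsets_alt
  have hstep : (fun (st : List (List Int) × Option Int) (p : Int × Bool) =>
      if p.2 = ind then
        match st.2 with
        | some prev =>
            if p.1 - prev = 1 then (pvAppendLast st.1 p.1, some p.1)
            else (st.1 ++ [[p.1]], some p.1)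
        | none => (st.1 ++ [[p.1]], some p.1)
      else st)
      = (fun st p => if p.2 = ind then pvStep st p.1 else st) := rfl
  rw [hstep, PySem.List.foldl_ite_eq_foldl_filter, ← List.foldl_map, pvEnumFilter_eq]

-- pvAppendLast on a snoc
theorem pvAppendLast_snoc (L : List (List Int)) (a : List Int) (z : Int) :
    pvAppendLast (L ++ [a]) z = L ++ [a ++ [z]] := by
  induction L with
  | nil => rfl
  | cons x xs ih =>
    cases xs with
    | nil => simp [pvAppendLast]
    | cons w ws =>
      simp only [List.cons_append, pvAppendLast]
      rw [← List.cons_append, ih]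
      simp

-- labels are monotone
theorem pvLab_mono (idx : List Int) {j k : Nat} (h : j ≤ k) : pvLab idx j ≤ pvLab idx k := by
  unfold pvLab
  have : k = j + (k - j) := by omega
  rw [this, List.range_add, List.countP_append]
  omega

-- main combinatorial lemma
theorem pvMain (idx : List Int) (hp : idx.Pairwise (· < ·)) (hne : idx ≠ []) :
    idx.foldl pvStep ([], none) = (pvGA idx, some (idx.getLast hne)) := by
  induction idx using List.reverseRecOn with
  | nil => exact absurd rfl hne
  | append_singleton ys z ih =>
    rcases eq_or_ne ys [] with hys | hys
    · subst hys
      simp only [List.nil_append, List.foldl_cons, List.foldl_nil, pvStep]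
      rw [List.getLast_singleton]
      refine Prod.ext ?_ rfl
      simp [pvGA, pvLab, pvGap, List.range_succ]
    · have hpys : ys.Pairwise (· < ·) := (List.pairwise_append.mp hp).1
      have hlt : ∀ y ∈ ys, y < z := by
        intro y hy
        exact (List.pairwise_append.mp hp).2.2 y hy z (List.mem_singleton_self z)
      have ihv := ih hpys hys
      obtain ⟨m, hm⟩ : ∃ m, ys.length = m + 1 :=
        ⟨ys.length - 1, by have := List.length_pos_iff.mpr hys; omega⟩
      set last := ys.getLast hys with hlast
      have hlastlt : last < z := hlt _ (List.getLast_mem hys)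
      -- getD facts on ys ++ [z]
      have hgetD_lt : ∀ t, t < ys.length → (ys ++ [z]).getD t 0 = ys.getD t 0 := by
        intro t ht
        rw [List.getD_eq_getElem?_getD, List.getD_eq_getElem?_getD,
            List.getElem?_append_left ht]
      have hgetD_last : (ys ++ [z]).getD ys.length 0 = z := by
        rw [List.getD_eq_getElem?_getD, List.getElem?_append_right le_rfl]
        simp
      have hgetD_ys_last : ys.getD m 0 = last := by
        rw [hlast, List.getLast_eq_getElem, List.getD_eq_getElem?_getD]
        simp [hm]
      -- gap facts
      have hgap_lt : ∀ t, t < m → pvGap (ys ++ [z]) t = pvGap ys t := by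
        intro t ht
        unfold pvGap
        rw [hgetD_lt t (by omega), hgetD_lt (t+1) (by omega)]
        have h1 : decide (t < (ys ++ [z]).length - 1) = true := by
          rw [decide_eq_true_iff, List.length_append]
          simp [hm]; omega
        have h2 : decide (t < ys.length - 1) = true := by
          rw [decide_eq_true_iff]; omega
        rw [h1, h2]
      have hgap_m : pvGap (ys ++ [z]) m = decide (z - last > 1) := by
        unfold pvGap
        have he : (ys ++ [z]).getD (m+1) 0 = z := by
          rw [show m + 1 = ys.length from by omega]; exact hgetD_last
        have he2 : (ys ++ [z]).getD m 0 = last := by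
          rw [hgetD_lt m (by omega)]; exact hgetD_ys_last
        rw [he, he2]
        have h1 : decide (m < (ys ++ [z]).length - 1) = true := by
          rw [decide_eq_true_iff, List.length_append]
          simp [hm]
        rw [h1, Bool.true_and]
      have hgap_ys_m : pvGap ys m = false := by
        unfold pvGap
        have h1 : decide (m < ys.length - 1) = false := by
          rw [decide_eq_false_iff_not]; omega
        rw [h1, Bool.false_and]
      -- label facts
      have hlab_lt : ∀ j, j ≤ m → pvLab (ys ++ [z]) j = pvLab ys j := by
        intro j hj
        unfold pvLab
        apply List.countP_congr
        intro t ht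
        rw [hgap_lt t (by have := List.mem_range.mp ht; omega)]
      have hlab_ys_len : pvLab ys ys.length = pvLab ys m := by
        rw [hm, pvLab, List.range_succ, List.countP_append]
        simp [pvLab, hgap_ys_m]
      have hlab_len : pvLab (ys ++ [z]) ys.length
          = pvLab ys ys.length + (if z - last > 1 then 1 else 0) := by
        rw [hm, pvLab, List.range_succ, List.countP_append, ← pvLab, hlab_lt m le_rfl]
        have hc : List.countP (pvGap (ys ++ [z])) [m] = if z - last > 1 then 1 else 0 := by
          rw [List.countP_cons, List.countP_nil, hgap_m]
          by_cases hz : z - last > 1 <;> simp [hz]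
        rw [hc]
        have h' := hlab_ys_len
        rw [hm] at h'
        omega
      have hlab_full : pvLab (ys ++ [z]) (ys ++ [z]).length = pvLab (ys ++ [z]) ys.length := by
        rw [List.length_append, List.length_singleton, pvLab, List.range_succ,
            List.countP_append, ← pvLab]
        have hgl : pvGap (ys ++ [z]) ys.length = false := by
          unfold pvGap
          have h1 : decide (ys.length < (ys ++ [z]).length - 1) = false := by
            rw [decide_eq_false_iff_not, List.length_append]
            simp
          rw [h1, Bool.false_and]
        simp [hgl]
      -- filter decomposition over range (ys.length + 1)
      have hfilter : ∀ c : Nat,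
          ((List.range ((ys ++ [z]).length)).filter (fun j => pvLab (ys ++ [z]) j = c)).map
            (fun j => (ys ++ [z]).getD j 0)
          = ((List.range ys.length).filter (fun j => pvLab ys j = c)).map (fun j => ys.getD j 0)
            ++ (if pvLab (ys ++ [z]) ys.length = c then [z] else []) := by
        intro c
        rw [List.length_append, List.length_singleton, List.range_succ, List.filter_append,
            List.map_append]
        congr 1
        · have hf : (List.range ys.length).filter (fun j => decide (pvLab (ys ++ [z]) j = c))
              = (List.range ys.length).filter (fun j => decide (pvLab ys j = c)) := by
            apply List.filter_congr
            intro j hj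
            have hjm : j ≤ m := by have := List.mem_range.mp hj; omega
            rw [hlab_lt j hjm]
          rw [hf]
          apply List.map_congr_left
          intro j hj
          have hjlt : j < ys.length := List.mem_range.mp (List.mem_of_mem_filter hj)
          exact hgetD_lt j hjlt
        · by_cases hc : pvLab (ys ++ [z]) ys.length = c
          · simp [hc]
          · simp [hc]
      -- now split on the gap
      rw [List.foldl_append, ihv]
      simp only [List.foldl_cons, List.foldl_nil, pvStep]
      rw [List.getLast_append_singleton]
      by_cases hg : z - last > 1
      · -- new group
        have hz1 : ¬ (z - last = 1) := by omega
        rw [if_neg hz1]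
        have hlabf : pvLab (ys ++ [z]) (ys ++ [z]).length = pvLab ys ys.length + 1 := by
          rw [hlab_full, hlab_len, if_pos hg]
        have hlab_len' : pvLab (ys ++ [z]) ys.length = pvLab ys ys.length + 1 := by
          rw [hlab_len, if_pos hg]
        refine Prod.ext ?_ rfl
        show pvGA ys ++ [[z]] = pvGA (ys ++ [z])
        have hL : pvGA (ys ++ [z])
            = (List.range (pvLab ys ys.length + 1)).map (fun c =>
                ((List.range (ys ++ [z]).length).filter (fun j => pvLab (ys ++ [z]) j = c)).map
                  (fun j => (ys ++ [z]).getD j 0))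
              ++ [((List.range (ys ++ [z]).length).filter
                    (fun j => pvLab (ys ++ [z]) j = pvLab ys ys.length + 1)).map
                  (fun j => (ys ++ [z]).getD j 0)] := by
          unfold pvGA
          rw [hlabf, List.range_succ, List.map_append, List.map_singleton]
        have hGAys : pvGA ys = (List.range (pvLab ys ys.length + 1)).map (fun c =>
              ((List.range ys.length).filter (fun j => pvLab ys j = c)).map (fun j => ys.getD j 0)) := rfl
        rw [hL, hGAys]
        congr 1
        · apply List.map_congr_left
          intro c hc
          have hcn : c < pvLab ys ys.length + 1 := List.mem_range.mp hc
          rw [hfilter c, hlab_len']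
          have hne' : ¬ (pvLab ys ys.length + 1 = c) := by omega
          simp [hne']
        · rw [hfilter (pvLab ys ys.length + 1), hlab_len', if_pos rfl]
          have hempty : (List.range ys.length).filter
              (fun j => decide (pvLab ys j = pvLab ys ys.length + 1)) = [] := by
            rw [List.filter_eq_nil_iff]
            intro j hj
            have hle : pvLab ys j ≤ pvLab ys ys.length :=
              pvLab_mono ys (le_of_lt (List.mem_range.mp hj))
            simp; omega
          rw [hempty]
          simp
      · -- extend the last group: strict increase gives z = last + 1
        have hz1 : z - last = 1 := by omega
        rw [if_pos hz1]
        have hlabf : pvLab (ys ++ [z]) (ys ++ [z]).length = pvLab ys ys.length := by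
          rw [hlab_full, hlab_len, if_neg hg]
          ring
        have hlab_len' : pvLab (ys ++ [z]) ys.length = pvLab ys ys.length := by
          rw [hlab_len, if_neg hg]
          omega
        refine Prod.ext ?_ rfl
        show pvAppendLast (pvGA ys) z = pvGA (ys ++ [z])
        have hL : pvGA (ys ++ [z])
            = (List.range (pvLab ys ys.length)).map (fun c =>
                ((List.range (ys ++ [z]).length).filter (fun j => pvLab (ys ++ [z]) j = c)).map
                  (fun j => (ys ++ [z]).getD j 0))
              ++ [((List.range (ys ++ [z]).length).filter
                    (fun j => pvLab (ys ++ [z]) j = pvLab ys ys.length)).map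
                  (fun j => (ys ++ [z]).getD j 0)] := by
          unfold pvGA
          rw [hlabf, List.range_succ, List.map_append, List.map_singleton]
        have hGAys : pvGA ys = (List.range (pvLab ys ys.length)).map (fun c =>
              ((List.range ys.length).filter (fun j => pvLab ys j = c)).map (fun j => ys.getD j 0))
            ++ [((List.range ys.length).filter
                  (fun j => pvLab ys j = pvLab ys ys.length)).map (fun j => ys.getD j 0)] := by
          unfold pvGA
          rw [List.range_succ, List.map_append, List.map_singleton]
        rw [hGAys, pvAppendLast_snoc, hL]
        congr 1
        · apply List.map_congr_left
          intro c hc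
          have hcn : c < pvLab ys ys.length := List.mem_range.mp hc
          rw [hfilter c, hlab_len']
          have hne' : ¬ (pvLab ys ys.length = c) := by omega
          simp [hne']
        · rw [hfilter (pvLab ys ys.length), hlab_len', if_pos rfl]

-- A = [[]] on D_
theorem pvA_nomatch (l : List Bool) (ind : Bool) (h : ind ∉ l) :
    get_compound_subsets l ind = [[]] := by
  rw [pvA_eq_GA, pvIdx_nil_of_not_mem l ind 0 h]
  simp [pvGA, pvLab]

theorem pvB_nomatch (l : List Bool) (ind : Bool) (h : ind ∉ l) :
    get_compound_subsets_alt l ind = [] := by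
  rw [pvB_eq_fold, pvIdx_nil_of_not_mem l ind 0 h]
  rfl

-- ===== VERDICT (by name: the statement is the Claim_ definition above) =====
theorem get_compound_subsets_spec : Claim_unchanged_get_compound_subsets := by
  intro l ind _ hD
  have hmem : ind ∈ l := not_not.mp hD
  have hne : pvIdx l ind 0 ≠ [] := pvIdx_ne_nil_of_mem l ind 0 hmem
  rw [pvA_eq_GA, pvB_eq_fold, pvMain (pvIdx l ind 0) (pvIdx_pairwise l ind 0) hne]

theorem get_compound_subsets_changed : Claim_changed_get_compound_subsets := by
  unfold Claim_changed_get_compound_subsets; decide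

theorem get_compound_subsets_tight : Claim_exact_get_compound_subsets := by
  intro l ind _ hD
  rw [pvA_nomatch l ind hD, pvB_nomatch l ind hD]
  simp
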